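-- pv_equiv track=rewrite | github.com/kywoo26/locontext | src/locontext/app/sources.py | _normalize_source_ids
-- ===== SOURCE A (Python) =====
-- def _normalize_source_ids(
--     source_ids: list[str],
-- ) -> tuple[tuple[str, ...], tuple[str, ...]]:
--     normalized_source_ids: list[str] = []
--     duplicate_source_ids: list[str] = []
--     seen: set[str] = set()
--
--     for source_id in source_ids:
--         if source_id in seen:
--             duplicate_source_ids.append(source_id)
--             continue
--         seen.add(source_id)
--         normalized_source_ids.append(source_id)
--
--     return tuple(normalized_source_ids), tuple(duplicate_source_ids)
-- ===== SOURCE B (Python) =====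
-- def _normalize_source_ids(
--     source_ids: list[str],
-- ) -> tuple[tuple[str, ...], tuple[str, ...]]:
--     normalized = list(dict.fromkeys(source_ids))
--     remaining = list(source_ids)
--     for u in normalized:
--         remaining.remove(u)  # never raises: every unique id occurs in remaining
--     return tuple(normalized), tuple(remaining)
-- ===== Notes on version B (the rewrite author's own statement) =====
-- stated objective: simpler
-- what changed: Replaced the single seen-set partition loop by a dedup-then-subtract decomposition: uniques come from dict.fromkeys, duplicates are what survives after removing each unique's first occurrence from a copy of the input.
import Mathlib
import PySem

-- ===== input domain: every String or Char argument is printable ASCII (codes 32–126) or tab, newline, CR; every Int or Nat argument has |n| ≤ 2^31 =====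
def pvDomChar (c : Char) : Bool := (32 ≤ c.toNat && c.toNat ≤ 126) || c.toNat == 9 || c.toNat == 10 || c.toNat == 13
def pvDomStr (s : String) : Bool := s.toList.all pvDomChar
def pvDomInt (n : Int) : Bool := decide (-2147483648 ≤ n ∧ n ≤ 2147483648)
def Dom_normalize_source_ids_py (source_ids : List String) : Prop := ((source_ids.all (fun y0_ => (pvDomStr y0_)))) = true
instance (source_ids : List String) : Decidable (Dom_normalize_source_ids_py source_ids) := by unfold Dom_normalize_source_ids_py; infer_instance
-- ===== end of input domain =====

-- B replaces A's single seen-set partition loop by a dedup-then-subtract decomposition (objective: simpler).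


-- ===== PORT A =====
-- state = (normalized_source_ids, duplicate_source_ids, seen)
def normalize_source_ids_py (source_ids : List String) : List String × List String :=
  let st := source_ids.foldl
    (fun (st : List String × List String × PySem.Set String) source_id =>
      if PySem.Set.contains st.2.2 source_id then
        (st.1, st.2.1 ++ [source_id], st.2.2)
      else
        (st.1 ++ [source_id], st.2.1, PySem.Set.add st.2.2 source_id))
    ([], [], PySem.Set.empty)
  (st.1, st.2.1)

-- ===== PORT B =====
-- list(dict.fromkeys(xs)) = PySem.List.dedup; remaining.remove(u) = PySem.List.remove?
-- (remove never raises in Source B — each unique id occurs — so getD's default is never used)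
def normalize_source_ids_py_alt (source_ids : List String) : List String × List String :=
  let normalized := PySem.List.dedup source_ids
  let remaining := normalized.foldl
    (fun r u => (PySem.List.remove? r u).getD r) source_ids
  (normalized, remaining)

-- ===== PRECONDITION & SPEC =====
def Spec_normalize_source_ids_py (source_ids : List String) (out : List String × List String) : Prop := out = normalize_source_ids_py_alt source_ids
instance (source_ids : List String) (out : List String × List String) : Decidable (Spec_normalize_source_ids_py source_ids out) := by unfold Spec_normalize_source_ids_py; infer_instance

-- ===== CLAIM (what is proved, stated in full; the proofs are below) =====
def Claim_equal_normalize_source_ids_py : Prop := ∀ (source_ids : List String), Dom_normalize_source_ids_py source_ids → Spec_normalize_source_ids_py source_ids (normalize_source_ids_py source_ids)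

-- ===== LEMMAS AND PROOFS =====

-- F s t: elements of t not in s, first occurrences, in order (what A appends to normalized)
def pvF (s : PySem.Set String) : List String → List String
  | [] => []
  | x :: t => if PySem.Set.contains s x then pvF s t else x :: pvF (PySem.Set.add s x) t

-- R s t: occurrences in t already seen (what A appends to duplicates)
def pvR (s : PySem.Set String) : List String → List String
  | [] => []
  | x :: t => if PySem.Set.contains s x then x :: pvR s t else pvR (PySem.Set.add s x) t

lemma pvAdd_pos {s : PySem.Set String} {x : String} (h : PySem.Set.contains s x = true) :
    PySem.Set.add s x = s := by
  simp only [PySem.Set.add, if_pos h]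

lemma pvAdd_neg {s : PySem.Set String} {x : String} (h : ¬ PySem.Set.contains s x = true) :
    PySem.Set.add s x = s ++ [x] := by
  simp only [PySem.Set.add, if_neg h]

lemma pvLoopA (t : List String) : ∀ (norm dup : List String) (s : PySem.Set String),
    t.foldl (fun (st : List String × List String × PySem.Set String) x =>
      if PySem.Set.contains st.2.2 x then (st.1, st.2.1 ++ [x], st.2.2)
      else (st.1 ++ [x], st.2.1, PySem.Set.add st.2.2 x)) (norm, dup, s)
    = (norm ++ pvF s t, dup ++ pvR s t, PySem.Set.update s t) := by
  induction t with
  | nil => intro norm dup s; simp [pvF, pvR, PySem.Set.update]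
  | cons x t ih =>
    intro norm dup s
    simp only [List.foldl_cons, pvF, pvR]
    by_cases h : PySem.Set.contains s x
    · rw [if_pos h, if_pos h, if_pos h, ih]
      simp [PySem.Set.update, pvAdd_pos h]
    · rw [if_neg h, if_neg h, if_neg h, ih]
      simp [PySem.Set.update]

lemma pvUpdate_eq_append (t : List String) : ∀ s, PySem.Set.update s t = s ++ pvF s t := by
  induction t with
  | nil => intro s; simp [pvF, PySem.Set.update]
  | cons x t ih =>
    intro s
    simp only [pvF, PySem.Set.update, List.foldl_cons]
    by_cases h : PySem.Set.contains s x
    · rw [if_pos h, pvAdd_pos h]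
      exact ih s
    · rw [if_neg h]
      have hadd : PySem.Set.add s x = s ++ [x] := pvAdd_neg h
      rw [show (List.foldl PySem.Set.add (PySem.Set.add s x) t : List String)
            = PySem.Set.update (PySem.Set.add s x) t from rfl, ih (PySem.Set.add s x), hadd,
        List.append_assoc]
      rfl

lemma pvF_not_mem (t : List String) : ∀ (s : PySem.Set String) (y : String),
    y ∈ pvF s t → ¬ y ∈ s := by
  induction t with
  | nil => intro s y hy; simp [pvF] at hy
  | cons x t ih =>
    intro s y hy
    simp only [pvF] at hy
    by_cases h : PySem.Set.contains s x
    · rw [if_pos h] at hy; exact ih s y hy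
    · rw [if_neg h] at hy
      rcases List.mem_cons.mp hy with rfl | hy'
      · intro hmem
        exact h ((PySem.Set.contains_iff s y).mpr hmem)
      · intro hmem
        exact ih _ y hy' ((PySem.Set.mem_add s x y).mpr (Or.inl hmem))

lemma pvRem_cons_ne (x u : String) (r : List String) (h : x ≠ u) :
    (PySem.List.remove? (x :: r) u).getD (x :: r) = x :: (PySem.List.remove? r u).getD r := by
  rw [PySem.List.remove?_cons_of_ne r h]
  cases PySem.List.remove? r u <;> simp

lemma pvFoldl_rem_cons (N : List String) : ∀ (x : String) (r : List String), x ∉ N →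
    N.foldl (fun r u => (PySem.List.remove? r u).getD r) (x :: r)
    = x :: N.foldl (fun r u => (PySem.List.remove? r u).getD r) r := by
  induction N with
  | nil => intro x r _; rfl
  | cons u N ih =>
    intro x r hx
    simp only [List.foldl_cons]
    rw [pvRem_cons_ne x u r (fun he => hx (he ▸ List.mem_cons_self ..)),
      ih x _ (fun h => hx (List.mem_cons_of_mem _ h))]

lemma pvSubtract (t : List String) : ∀ (s : PySem.Set String),
    (pvF s t).foldl (fun r u => (PySem.List.remove? r u).getD r) t = pvR s t := by
  induction t with
  | nil => intro s; rfl
  | cons x t ih =>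
    intro s
    simp only [pvF, pvR]
    by_cases h : PySem.Set.contains s x
    · rw [if_pos h, if_pos h]
      have hx : x ∉ pvF s t := fun hm =>
        pvF_not_mem t s x hm ((PySem.Set.contains_iff s x).mp h)
      rw [pvFoldl_rem_cons _ x t hx, ih s]
    · rw [if_neg h, if_neg h]
      simp only [List.foldl_cons, PySem.List.remove?_cons_self, Option.getD_some]
      exact ih (PySem.Set.add s x)

-- ===== VERDICT (by name: the statement is the Claim_ definition above) =====
theorem normalize_source_ids_py_spec : Claim_equal_normalize_source_ids_py := by
  intro source_ids _
  show _ = _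
  unfold normalize_source_ids_py normalize_source_ids_py_alt
  rw [pvLoopA]
  have hded : PySem.List.dedup source_ids = pvF PySem.Set.empty source_ids := by
    rw [PySem.List.dedup_eq_ofList]
    rw [show (PySem.Set.ofList source_ids : PySem.Set String)
          = PySem.Set.update PySem.Set.empty source_ids from rfl,
      pvUpdate_eq_append]
    rfl
  simp only [hded]
  rw [pvSubtract]
  rfl
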